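-- pv_equiv track=rewrite | github.com/DefNewUser/my-codewars | solution_6.py | tower_builder3
-- ===== SOURCE A (Python) =====
-- def tower_builder3(n_floors):
--     tower = []
--     floor = ''
--
--     for f in range(n_floors):
--         stars = '*' * (f * 2 + 1)
--         spaces = ' ' * (n_floors - f - 1)
--         floor += spaces + stars + spaces
--         tower.append(floor)
--
--     return tower
-- ===== SOURCE B (Python) =====
-- def tower_builder3(n_floors):
--     bands = [' ' * (n_floors - f - 1) + '*' * (2 * f + 1) + ' ' * (n_floors - f - 1)
--              for f in range(n_floors)]
--     return [''.join(bands[:f + 1]) for f in range(n_floors)]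
-- ===== Notes on version B (the rewrite author's own statement) =====
-- stated objective: simpler
-- what changed: B first builds the list of individual bands in one pass and then produces each row as a prefix-join of that list, instead of A's single loop threading a running accumulator string that it appends to.
import Mathlib
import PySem

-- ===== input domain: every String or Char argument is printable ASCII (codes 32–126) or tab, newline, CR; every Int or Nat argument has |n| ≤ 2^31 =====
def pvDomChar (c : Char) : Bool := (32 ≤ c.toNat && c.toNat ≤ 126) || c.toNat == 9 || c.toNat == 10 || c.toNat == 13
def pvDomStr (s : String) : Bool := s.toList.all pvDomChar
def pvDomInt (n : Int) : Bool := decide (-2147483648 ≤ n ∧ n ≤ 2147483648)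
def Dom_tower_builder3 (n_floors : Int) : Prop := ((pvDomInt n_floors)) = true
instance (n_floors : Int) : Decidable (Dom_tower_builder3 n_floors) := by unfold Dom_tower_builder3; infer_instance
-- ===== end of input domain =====

-- B builds the band list first and derives each row as a prefix-join, replacing A's
-- single loop with a running accumulator string; objective: simpler decomposition.


-- ===== PORT A =====
-- 'c' * n in Python: n copies of the character (empty for n ≤ 0); exact, ported by hand
def pyCharMul (c : Char) (n : Int) : String := String.ofList (List.replicate n.toNat c)

def tower_builder3 (n_floors : Int) : List String :=
  ((PySem.List.pyRange 0 n_floors).foldl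
    (fun (st : List String × String) f =>
      let stars := pyCharMul '*' (f * 2 + 1)
      let spaces := pyCharMul ' ' (n_floors - f - 1)
      let floor := st.2 ++ (spaces ++ stars ++ spaces)
      (st.1 ++ [floor], floor)) ([], "")).1

-- ===== PORT B =====
def tower_builder3_alt (n_floors : Int) : List String :=
  let bands := (PySem.List.pyRange 0 n_floors).map
    (fun f => pyCharMul ' ' (n_floors - f - 1) ++ pyCharMul '*' (2 * f + 1)
              ++ pyCharMul ' ' (n_floors - f - 1))
  (PySem.List.pyRange 0 n_floors).map
    (fun f => PySem.Str.join "" (PySem.List.slice bands none (some (f + 1))))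

-- ===== PRECONDITION & SPEC =====
def Spec_tower_builder3 (n_floors : Int) (out : List String) : Prop := out = tower_builder3_alt n_floors
instance (n_floors : Int) (out : List String) : Decidable (Spec_tower_builder3 n_floors out) := by unfold Spec_tower_builder3; infer_instance

-- ===== CLAIM (what is proved, stated in full; the proofs are below) =====
def Claim_equal_tower_builder3 : Prop := ∀ (n_floors : Int), Dom_tower_builder3 n_floors → Spec_tower_builder3 n_floors (tower_builder3 n_floors)

-- ===== LEMMAS AND PROOFS =====

-- the band of floor f in a tower of n floors (A's order of construction; B's 2*f+1 = f*2+1)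
def bandF (n f : Int) : String :=
  pyCharMul ' ' (n - f - 1) ++ pyCharMul '*' (f * 2 + 1) ++ pyCharMul ' ' (n - f - 1)

-- the cumulative row: join of the first bands
def rowJ (n m : Int) : String :=
  PySem.Str.join "" ((PySem.List.pyRange 0 m).map (bandF n))

theorem intercalate_nil_eq_flatten (l : List (List Char)) : [].intercalate l = l.flatten := by
  induction l with
  | nil => rfl
  | cons a t ih =>
    cases t with
    | nil => simp [List.intercalate]
    | cons b t2 =>
      simp [List.intercalate, List.intersperse] at *
      simpa [List.intercalate, List.intersperse] using ih

theorem join_empty_append (l : List String) (x : String) :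
    PySem.Str.join "" (l ++ [x]) = PySem.Str.join "" l ++ x := by
  apply String.ext
  simp [PySem.Str.toList_join, PySem.Chars.join, intercalate_nil_eq_flatten]

theorem rowJ_zero (n : Int) : rowJ n 0 = "" := by
  unfold rowJ
  rw [PySem.List.pyRange_one_eq_nil (le_refl (0 : Int))]
  apply String.ext
  simp [PySem.Str.toList_join, PySem.Chars.join, List.intercalate]

theorem rowJ_succ (n : Int) (m : Nat) :
    rowJ n ((m : Int) + 1) = rowJ n m ++ bandF n m := by
  unfold rowJ
  rw [PySem.List.pyRange_one_succ_right (by exact_mod_cast Nat.zero_le m)]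
  simp [join_empty_append]

-- loop invariant for A's fold: after m iterations the accumulator list holds the
-- cumulative rows 1..m and the running string is the join of the first m bands
theorem towerA_inv (n : Int) (m : Nat) (hm : (m : Int) ≤ n) :
    ((PySem.List.pyRange 0 (m : Int)).foldl
      (fun (st : List String × String) f =>
        (st.1 ++ [st.2 ++ (pyCharMul ' ' (n - f - 1) ++ pyCharMul '*' (f * 2 + 1)
                           ++ pyCharMul ' ' (n - f - 1))],
         st.2 ++ (pyCharMul ' ' (n - f - 1) ++ pyCharMul '*' (f * 2 + 1)
                  ++ pyCharMul ' ' (n - f - 1)))) ([], "")) =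
    ((PySem.List.pyRange 0 (m : Int)).map (fun f => rowJ n (f + 1)), rowJ n m) := by
  induction m with
  | zero =>
    rw [show ((0 : Nat) : Int) = (0 : Int) from rfl,
      PySem.List.pyRange_one_eq_nil (le_refl (0 : Int))]
    simp only [List.foldl_nil, List.map_nil]
    rw [rowJ_zero]
  | succ k ih =>
    have hk : (k : Int) ≤ n := by push_cast at hm ⊢; omega
    rw [show ((k + 1 : Nat) : Int) = (k : Int) + 1 by push_cast; ring,
        PySem.List.pyRange_one_succ_right (by exact_mod_cast Nat.zero_le k),
        List.foldl_append, List.map_append, ih hk]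
    simp only [List.foldl_cons, List.foldl_nil, List.map_cons, List.map_nil]
    rw [rowJ_succ]
    rfl

-- for 0 ≤ f < n, B's prefix slice of the band list is the first f+1 bands
theorem slice_bands (n f : Int) (h0 : 0 ≤ f) (hf : f < n) :
    PySem.List.slice ((PySem.List.pyRange 0 n).map (bandF n)) none (some (f + 1)) =
    (PySem.List.pyRange 0 (f + 1)).map (bandF n) := by
  rw [PySem.List.slice_to _ (by omega),
      PySem.List.pyRange_one_append 0 (f + 1) n (by omega) (by omega),
      List.map_append]
  have hlen : (((PySem.List.pyRange 0 (f + 1)).map (bandF n)).length) = (f + 1).toNat := by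
    simp [PySem.List.length_pyRange_one]
  rw [← hlen, List.take_left]

theorem bandF_alt (n f : Int) :
    pyCharMul ' ' (n - f - 1) ++ pyCharMul '*' (2 * f + 1) ++ pyCharMul ' ' (n - f - 1)
      = bandF n f := by
  unfold bandF
  rw [show 2 * f + 1 = f * 2 + 1 by ring]

theorem alt_eq_rows (n : Int) :
    tower_builder3_alt n = (PySem.List.pyRange 0 n).map (fun f => rowJ n (f + 1)) := by
  unfold tower_builder3_alt
  apply List.map_congr_left
  intro f hf
  rw [PySem.List.mem_pyRange_one] at hf
  have hb : ((PySem.List.pyRange 0 n).map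
      (fun f => pyCharMul ' ' (n - f - 1) ++ pyCharMul '*' (2 * f + 1)
                ++ pyCharMul ' ' (n - f - 1))) = (PySem.List.pyRange 0 n).map (bandF n) := by
    apply List.map_congr_left; intro g _; exact bandF_alt n g
  rw [hb, slice_bands n f hf.1 hf.2, rowJ]

-- ===== VERDICT (by name: the statement is the Claim_ definition above) =====
theorem tower_builder3_spec : Claim_equal_tower_builder3 := by
  intro n _
  unfold Spec_tower_builder3
  rw [alt_eq_rows]
  unfold tower_builder3
  by_cases hn : 0 ≤ n
  · have : n = ((n.toNat : Int)) := by omega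
    rw [this, towerA_inv n.toNat n.toNat (by omega)]
  · rw [PySem.List.pyRange_one_eq_nil (by omega)]
    rfl
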